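-- pv_equiv track=rewrite | github.com/sykwon/sigmod2025like | src/util.py | pattern_gen3
-- ===== SOURCE A (Python) =====
-- def pattern_gen3(sentences, pat_type="sub", max_len=None, **kwargs):
--     patterns = set()
--     word_tuples = set()
--     for sentence in sentences:
--         words = sentence.split()
--         for i in range(len(words)):
--             for j in range(i + 1, len(words)):
--                 word_tuples.add((words[i], words[j]))
--
--     for words in word_tuples:
--         word1, word2 = words
--         for i in range(len(word1)):
--             for j in range(i + 1, len(word1) + 1):
--                 for k in range(len(word2)):
--                     for l in range(k + 1, len(word2) + 1):
--                         if (j - i) + (l - k) + 3 > max_len: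
--                             continue
--                         pattern = "%" + word1[i:j] + "%" + word2[k:l] + "%"
--                         patterns.add(pattern)
--     patterns = list(sorted(patterns))
--     return patterns
-- ===== SOURCE B (Python) =====
-- def pattern_gen3(sentences, pat_type="sub", max_len=None, **kwargs):
--     pairs = set()
--     for sentence in sentences:
--         words = sentence.split()
--         for i, w1 in enumerate(words):
--             for w2 in words[i + 1:]:
--                 pairs.add((w1, w2))
--     cap = max_len - 4  # a substring can pair only with a non-empty one, so each side is at most max_len - 4
--     words_set = set()
--     for w1, w2 in pairs:
--         words_set.add(w1)
--         words_set.add(w2)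
--     subs = {}
--     for w in words_set:
--         s = set()
--         n = len(w)
--         for i in range(n):
--             hi = min(n, i + cap)
--             for j in range(i + 1, hi + 1):
--                 s.add(w[i:j])
--         subs[w] = s
--     patterns = set()
--     for w1, w2 in pairs:
--         for s1 in subs[w1]:
--             r = max_len - 3 - len(s1)
--             for s2 in subs[w2]:
--                 if len(s2) <= r:
--                     patterns.add("%" + s1 + "%" + s2 + "%")
--     return sorted(patterns)
-- ===== Notes on version B (the rewrite author's own statement) =====
-- stated objective: alternative
-- what changed: B computes the distinct length-capped substrings of each distinct word once (cached in a dict keyed by word) and combines the two substring sets per word pair, instead of A's re-enumeration of all index quadruples with fresh slicing for every word tuple; intended as faster on repetition-heavy input, measured only 1.2x at the largest generated size, so claimed as alternative.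
import Mathlib
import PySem

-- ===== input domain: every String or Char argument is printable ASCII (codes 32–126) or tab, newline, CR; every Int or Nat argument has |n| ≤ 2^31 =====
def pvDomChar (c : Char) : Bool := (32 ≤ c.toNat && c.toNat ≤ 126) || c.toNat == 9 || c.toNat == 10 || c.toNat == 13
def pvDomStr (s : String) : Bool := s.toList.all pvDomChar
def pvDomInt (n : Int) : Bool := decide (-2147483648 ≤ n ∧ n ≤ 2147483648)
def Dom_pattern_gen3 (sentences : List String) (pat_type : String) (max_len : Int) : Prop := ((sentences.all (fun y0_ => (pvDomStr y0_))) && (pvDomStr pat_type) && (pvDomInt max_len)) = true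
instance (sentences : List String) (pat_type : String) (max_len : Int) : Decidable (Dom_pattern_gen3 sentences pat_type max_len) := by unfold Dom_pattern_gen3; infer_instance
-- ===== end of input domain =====

-- B replaces A's per-tuple re-enumeration of all substring index ranges by substring sets
-- computed once per distinct word (length-capped), combined per word pair; same sorted result.

-- ===== PORT A =====
-- word_tuples loop of A
def pg3_tuples (sentences : List String) : PySem.Set (String × String) :=
  sentences.foldl (fun wt sentence =>
    let words := PySem.Str.split₀ sentence
    (PySem.List.pyRange 0 (words.length : Int)).foldl (fun wt i =>
      (PySem.List.pyRange (i + 1) (words.length : Int)).foldl (fun wt j =>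
        PySem.Set.add wt (PySem.List.pyGetD words i "", PySem.List.pyGetD words j "")) wt) wt)
    PySem.Set.empty

-- patterns loop of A (quadruple index loop per tuple, with the 'continue' filter)
def pg3_patterns (word_tuples : PySem.Set (String × String)) (max_len : Int) : PySem.Set String :=
  word_tuples.foldl (fun patterns words =>
    let word1 := words.1
    let word2 := words.2
    (PySem.List.pyRange 0 (PySem.Str.len word1)).foldl (fun patterns i =>
      (PySem.List.pyRange (i + 1) (PySem.Str.len word1 + 1)).foldl (fun patterns j =>
        (PySem.List.pyRange 0 (PySem.Str.len word2)).foldl (fun patterns k =>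
          (PySem.List.pyRange (k + 1) (PySem.Str.len word2 + 1)).foldl (fun patterns l =>
            if (j - i) + (l - k) + 3 > max_len then patterns
            else PySem.Set.add patterns (PySem.Str.join "" ["%", PySem.Str.slice word1 (some i) (some j), "%", PySem.Str.slice word2 (some k) (some l), "%"])) patterns) patterns) patterns) patterns)
    PySem.Set.empty

def pattern_gen3 (sentences : List String) (pat_type : String) (max_len : Int) : List String :=
  PySem.List.sorted (pg3_patterns (pg3_tuples sentences) max_len) (fun x => x)

-- ===== PORT B =====
-- pairs loop of B (enumerate + tail slice)
def pg3B_pairs (sentences : List String) : PySem.Set (String × String) :=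
  sentences.foldl (fun pairs sentence =>
    let words := PySem.Str.split₀ sentence
    (PySem.List.enumerate words).foldl (fun pairs iw =>
      (PySem.List.slice words (some (iw.1 + 1)) none).foldl (fun pairs w2 =>
        PySem.Set.add pairs (iw.2, w2)) pairs) pairs)
    PySem.Set.empty

-- the distinct non-empty substrings of w of length at most cap
def pg3B_subsOf (w : String) (cap : Int) : PySem.Set String :=
  let n := PySem.Str.len w
  (PySem.List.pyRange 0 n).foldl (fun s i =>
    let hi := min n (i + cap)
    (PySem.List.pyRange (i + 1) (hi + 1)).foldl (fun s j =>
      PySem.Set.add s (PySem.Str.slice w (some i) (some j))) s)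
    PySem.Set.empty

-- words_set loop of B
def pg3B_wordsSet (pairs : PySem.Set (String × String)) : PySem.Set String :=
  pairs.foldl (fun ws p => PySem.Set.add (PySem.Set.add ws p.1) p.2) PySem.Set.empty

-- subs dict of B: substring set computed once per distinct word
def pg3B_subs (ws : List String) (cap : Int) : PySem.Dict String (PySem.Set String) :=
  ws.foldl (fun d w => d.insert w (pg3B_subsOf w cap)) PySem.Dict.empty

-- patterns loop of B; Python's subs[w] is ported as getD with a default: every looked-up w is a key
def pg3B_patterns (pairs : PySem.Set (String × String)) (subs : PySem.Dict String (PySem.Set String)) (max_len : Int) : PySem.Set String :=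
  pairs.foldl (fun patterns p =>
    (subs.getD p.1 PySem.Set.empty).foldl (fun patterns s1 =>
      let r := max_len - 3 - PySem.Str.len s1
      (subs.getD p.2 PySem.Set.empty).foldl (fun patterns s2 =>
        if PySem.Str.len s2 ≤ r then PySem.Set.add patterns (PySem.Str.join "" ["%", s1, "%", s2, "%"]) else patterns) patterns) patterns) PySem.Set.empty

def pattern_gen3_alt (sentences : List String) (pat_type : String) (max_len : Int) : List String :=
  let pairs := pg3B_pairs sentences
  let cap := max_len - 4
  let subs := pg3B_subs (pg3B_wordsSet pairs) cap
  PySem.List.sorted (pg3B_patterns pairs subs max_len) (fun x => x)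

-- ===== PRECONDITION & SPEC =====
def Spec_pattern_gen3 (sentences : List String) (pat_type : String) (max_len : Int) (out : List String) : Prop := out = pattern_gen3_alt sentences pat_type max_len
instance (sentences : List String) (pat_type : String) (max_len : Int) (out : List String) : Decidable (Spec_pattern_gen3 sentences pat_type max_len out) := by unfold Spec_pattern_gen3; infer_instance

-- ===== CLAIM (what is proved, stated in full; the proofs are below) =====
def Claim_equal_pattern_gen3 : Prop := ∀ (sentences : List String) (pat_type : String) (max_len : Int), Dom_pattern_gen3 sentences pat_type max_len → Spec_pattern_gen3 sentences pat_type max_len (pattern_gen3 sentences pat_type max_len)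

-- ===== LEMMAS AND PROOFS =====

-- membership through a set-building fold whose step is characterised pointwise
theorem pg3_mem_foldl_set {ι α : Type} (g : PySem.Set α → ι → PySem.Set α) (P : ι → Prop) (x : α) :
    ∀ (l : List ι) (s0 : PySem.Set α), (∀ s i, i ∈ l → (x ∈ g s i ↔ x ∈ s ∨ P i)) →
    (x ∈ l.foldl g s0 ↔ x ∈ s0 ∨ ∃ i ∈ l, P i) := by
  intro l
  induction l with
  | nil => intro s0 h; simp
  | cons a t ih =>
    intro s0 h
    rw [List.foldl_cons, ih _ (fun s i hi => h s i (List.mem_cons_of_mem a hi))]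
    rw [h s0 a (List.mem_cons_self)]
    simp only [List.mem_cons]
    constructor
    · rintro (((hx | hp) | ⟨i, hi, hp⟩))
      · exact Or.inl hx
      · exact Or.inr ⟨a, Or.inl rfl, hp⟩
      · exact Or.inr ⟨i, Or.inr hi, hp⟩
    · rintro (hx | ⟨i, (rfl | hi), hp⟩)
      · exact Or.inl (Or.inl hx)
      · exact Or.inl (Or.inr hp)
      · exact Or.inr ⟨i, hi, hp⟩

theorem pg3_nodup_foldl_set {ι α : Type} (g : PySem.Set α → ι → PySem.Set α)
    (h : ∀ s i, List.Nodup s → List.Nodup (g s i)) (l : List ι) (s0 : PySem.Set α)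
    (h0 : List.Nodup s0) : List.Nodup (l.foldl g s0) :=
  List.foldlRecOn l g h0 (fun b hb a _ => h b a hb)

-- the pair (p.1, p.2) occurs as an ordered word pair of some sentence
def PairMem (sentences : List String) (p : String × String) : Prop :=
  ∃ s ∈ sentences, ∃ a b : Nat, a < b ∧ b < (PySem.Str.split₀ s).length ∧
    (PySem.Str.split₀ s)[a]? = some p.1 ∧ (PySem.Str.split₀ s)[b]? = some p.2

-- x is a %sub1%sub2% pattern for the pair p under the length bound
def PatMem (max_len : Int) (p : String × String) (x : String) : Prop :=
  ∃ a b c d : Nat, a < b ∧ b ≤ p.1.toList.length ∧ c < d ∧ d ≤ p.2.toList.length ∧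
    ((b : Int) - a) + ((d : Int) - c) + 3 ≤ max_len ∧
    x = PySem.Str.join "" ["%", PySem.Str.slice p.1 (some (a : Int)) (some (b : Int)), "%",
                            PySem.Str.slice p.2 (some (c : Int)) (some (d : Int)), "%"]

theorem pg3_mem_enumerate {α : Type} (xs : List α) (s : Int) (q : Int × α) :
    q ∈ PySem.List.enumerate xs s ↔ ∃ k : Nat, q.1 = s + k ∧ xs[k]? = some q.2 := by
  induction xs generalizing s with
  | nil => simp [PySem.List.enumerate]
  | cons a t ih =>
    simp only [PySem.List.enumerate, List.mem_cons, ih]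
    constructor
    · rintro (rfl | ⟨k, hk, he⟩)
      · exact ⟨0, by simp⟩
      · exact ⟨k + 1, by push_cast; omega, by simpa using he⟩
    · rintro ⟨k, hk, he⟩
      cases k with
      | zero =>
        left
        simp at he hk
        obtain ⟨q1, q2⟩ := q
        simp_all
      | succ k =>
        right
        exact ⟨k, by push_cast at hk ⊢; omega, by simpa using he⟩

theorem pg3_mem_drop {α : Type} (xs : List α) (k : Nat) (x : α) :
    x ∈ xs.drop k ↔ ∃ i : Nat, k ≤ i ∧ xs[i]? = some x := by
  constructor
  · intro h
    rw [List.mem_iff_getElem] at h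
    obtain ⟨j, hj, he⟩ := h
    refine ⟨k + j, by omega, ?_⟩
    rw [List.getElem?_eq_some_iff]
    exact ⟨by simp [List.length_drop] at hj; omega, by rw [← List.getElem_drop]; exact he⟩
  · rintro ⟨i, hki, he⟩
    rw [List.getElem?_eq_some_iff] at he
    obtain ⟨hi, he⟩ := he
    rw [List.mem_iff_getElem]
    refine ⟨i - k, by simp; omega, ?_⟩
    rw [List.getElem_drop]
    subst he; congr 1; omega

theorem pg3_tuples_mem (sentences : List String) (p : String × String) :
    p ∈ pg3_tuples sentences ↔ PairMem sentences p := by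
  obtain ⟨p1, p2⟩ := p
  simp only [pg3_tuples]
  rw [pg3_mem_foldl_set _ (fun sentence => ∃ a b : Nat, a < b ∧ b < (PySem.Str.split₀ sentence).length ∧ (PySem.Str.split₀ sentence)[a]? = some p1 ∧ (PySem.Str.split₀ sentence)[b]? = some p2) (p1, p2) sentences PySem.Set.empty ?_]
  · simp only [PySem.Set.empty, List.not_mem_nil, false_or]
    exact Iff.rfl
  · intro s0 sentence _
    rw [pg3_mem_foldl_set _ (fun i : Int => ∃ j ∈ PySem.List.pyRange (i + 1) ((PySem.Str.split₀ sentence).length : Int), (p1, p2) = (PySem.List.pyGetD (PySem.Str.split₀ sentence) i "", PySem.List.pyGetD (PySem.Str.split₀ sentence) j "")) (p1, p2) _ s0 ?_]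
    · constructor
      · rintro (hx | ⟨i, hi, j, hj, hp⟩)
        · exact Or.inl hx
        · right
          rw [PySem.List.mem_pyRange_one] at hi hj
          obtain ⟨h0i, hin⟩ := hi
          obtain ⟨hij, hjn⟩ := hj
          rw [PySem.List.pyGetD_eq_getElem _ "" h0i (by omega),
              PySem.List.pyGetD_eq_getElem _ "" (show (0:Int) ≤ j by omega) hjn,
              Prod.mk.injEq] at hp
          refine ⟨i.toNat, j.toNat, by omega, by omega, ?_, ?_⟩
          · rw [List.getElem?_eq_getElem, hp.1]
          · rw [List.getElem?_eq_getElem, hp.2]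
      · rintro (hx | ⟨a, b, hab, hbn, ha, hb⟩)
        · exact Or.inl hx
        · right
          rw [List.getElem?_eq_some_iff] at ha hb
          obtain ⟨ha1, ha2⟩ := ha
          obtain ⟨hb1, hb2⟩ := hb
          refine ⟨(a : Int), by rw [PySem.List.mem_pyRange_one]; push_cast; omega,
                  (b : Int), by rw [PySem.List.mem_pyRange_one]; push_cast; omega, ?_⟩
          rw [PySem.List.pyGetD_eq_getElem _ "" (by omega) (by push_cast; omega),
              PySem.List.pyGetD_eq_getElem _ "" (by omega) (by push_cast; omega),
              Prod.mk.injEq]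
          simp only [Int.toNat_natCast]
          exact ⟨ha2.symm, hb2.symm⟩
    · intro s i _
      rw [pg3_mem_foldl_set _ (fun j : Int => (p1, p2) = (PySem.List.pyGetD (PySem.Str.split₀ sentence) i "", PySem.List.pyGetD (PySem.Str.split₀ sentence) j "")) (p1, p2) _ s (fun s' j _ => by rw [PySem.Set.mem_add])]

theorem pg3B_pairs_mem (sentences : List String) (p : String × String) :
    p ∈ pg3B_pairs sentences ↔ PairMem sentences p := by
  obtain ⟨p1, p2⟩ := p
  simp only [pg3B_pairs]
  rw [pg3_mem_foldl_set _ (fun sentence => ∃ a b : Nat, a < b ∧ b < (PySem.Str.split₀ sentence).length ∧ (PySem.Str.split₀ sentence)[a]? = some p1 ∧ (PySem.Str.split₀ sentence)[b]? = some p2) (p1, p2) sentences PySem.Set.empty ?_]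
  · simp only [PySem.Set.empty, List.not_mem_nil, false_or]
    exact Iff.rfl
  · intro s0 sentence _
    rw [pg3_mem_foldl_set _ (fun iw : Int × String => ∃ w2 ∈ PySem.List.slice (PySem.Str.split₀ sentence) (some (iw.1 + 1)) none, (p1, p2) = (iw.2, w2)) (p1, p2) _ s0 ?_]
    · constructor
      · rintro (hx | ⟨iw, hiw, w2, hw2, hp⟩)
        · exact Or.inl hx
        · right
          rw [pg3_mem_enumerate] at hiw
          obtain ⟨k, hk1, hk2⟩ := hiw
          have hcast : iw.1 + 1 = (((k + 1 : Nat)) : Int) := by push_cast; omega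
          rw [hcast, PySem.List.slice_from_natCast] at hw2
          rw [pg3_mem_drop] at hw2
          obtain ⟨b, hb1, hb2⟩ := hw2
          rw [Prod.mk.injEq] at hp
          refine ⟨k, b, by omega, ?_, ?_, ?_⟩
          · rw [List.getElem?_eq_some_iff] at hb2; exact hb2.1
          · rw [hk2, hp.1]
          · rw [hb2, hp.2]
      · rintro (hx | ⟨a, b, hab, hbn, ha, hb⟩)
        · exact Or.inl hx
        · right
          refine ⟨((a : Int), p1), ?_, p2, ?_, rfl⟩
          · rw [pg3_mem_enumerate]
            exact ⟨a, by omega, ha⟩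
          · have hcast : ((a : Int)) + 1 = (((a + 1 : Nat)) : Int) := by push_cast; omega
            rw [hcast, PySem.List.slice_from_natCast, pg3_mem_drop]
            exact ⟨b, by omega, hb⟩
    · intro s iw _
      rw [pg3_mem_foldl_set _ (fun w2 : String => (p1, p2) = (iw.2, w2)) (p1, p2) _ s (fun s' w2 _ => by rw [PySem.Set.mem_add])]

theorem pg3B_subsOf_mem (w : String) (cap : Int) (s : String) :
    s ∈ pg3B_subsOf w cap ↔ ∃ a b : Nat, a < b ∧ b ≤ w.toList.length ∧ (b : Int) ≤ (a : Int) + cap ∧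
      s = PySem.Str.slice w (some (a : Int)) (some (b : Int)) := by
  simp only [pg3B_subsOf]
  rw [pg3_mem_foldl_set _ (fun i : Int => ∃ j ∈ PySem.List.pyRange (i + 1) (min (PySem.Str.len w) (i + cap) + 1), s = PySem.Str.slice w (some i) (some j)) s _ PySem.Set.empty ?_]
  · simp only [PySem.Set.empty, List.not_mem_nil, false_or]
    constructor
    · rintro ⟨i, hi, j, hj, hs⟩
      rw [PySem.List.mem_pyRange_one, PySem.Str.len_eq] at hi hj
      obtain ⟨h0i, hin⟩ := hi
      obtain ⟨hij, hjm⟩ := hj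
      have hci : ((i.toNat : Nat) : Int) = i := Int.toNat_of_nonneg h0i
      have hcj : ((j.toNat : Nat) : Int) = j := Int.toNat_of_nonneg (by omega)
      refine ⟨i.toNat, j.toNat, by omega, by omega, by omega, ?_⟩
      rw [hci, hcj]
      exact hs
    · rintro ⟨a, b, hab, hbn, hbc, hs⟩
      refine ⟨(a : Int), ?_, (b : Int), ?_, hs⟩
      · rw [PySem.List.mem_pyRange_one, PySem.Str.len_eq]; push_cast; omega
      · rw [PySem.List.mem_pyRange_one, PySem.Str.len_eq]; push_cast; omega
  · intro s' i _
    rw [pg3_mem_foldl_set _ (fun j : Int => s = PySem.Str.slice w (some i) (some j)) s _ s' (fun s'' j _ => by rw [PySem.Set.mem_add])]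

theorem pg3_len_slice (w : String) (a b : Nat) (hab : a ≤ b) (hb : b ≤ w.toList.length) :
    PySem.Str.len (PySem.Str.slice w (some (a : Int)) (some (b : Int))) = (b : Int) - (a : Int) := by
  rw [PySem.Str.len_eq, PySem.Str.toList_slice, PySem.Chars.slice_eq_listSlice,
    PySem.List.slice_natCast]
  simp only [List.length_take, List.length_drop]
  omega

theorem pg3B_subs_getD_not_mem (ws : List String) (cap : Int) (w : String)
    (d : PySem.Dict String (PySem.Set String)) (hw : w ∉ ws) :
    (ws.foldl (fun d w => d.insert w (pg3B_subsOf w cap)) d).getD w PySem.Set.empty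
      = d.getD w PySem.Set.empty := by
  induction ws generalizing d with
  | nil => rfl
  | cons a t ih =>
    rw [List.foldl_cons, ih _ (fun h => hw (List.mem_cons_of_mem a h))]
    rw [PySem.Dict.getD_insert]
    simp only [List.mem_cons, not_or] at hw
    simp [hw.1]

theorem pg3B_subs_getD_mem (ws : List String) (cap : Int) (w : String)
    (d : PySem.Dict String (PySem.Set String)) (hw : w ∈ ws) :
    (ws.foldl (fun d w => d.insert w (pg3B_subsOf w cap)) d).getD w PySem.Set.empty
      = pg3B_subsOf w cap := by
  induction ws generalizing d with
  | nil => cases hw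
  | cons a t ih =>
    rw [List.foldl_cons]
    by_cases ht : w ∈ t
    · exact ih _ ht
    · have ha : w = a := by rcases List.mem_cons.1 hw with h | h; exact h; exact absurd h ht
      rw [pg3B_subs_getD_not_mem t cap w _ ht, PySem.Dict.getD_insert]
      simp [ha]

theorem pg3B_wordsSet_mem (pairs : PySem.Set (String × String)) (x : String) :
    x ∈ pg3B_wordsSet pairs ↔ ∃ p ∈ pairs, x = p.1 ∨ x = p.2 := by
  unfold pg3B_wordsSet
  rw [pg3_mem_foldl_set _ (fun p => x = p.1 ∨ x = p.2) x pairs PySem.Set.empty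
    (fun s p _ => by simp [PySem.Set.mem_add]; tauto)]
  simp [PySem.Set.empty]

theorem pg3_patterns_mem (wt : PySem.Set (String × String)) (max_len : Int) (x : String) :
    x ∈ pg3_patterns wt max_len ↔ ∃ p ∈ wt, PatMem max_len p x := by
  simp only [pg3_patterns]
  rw [pg3_mem_foldl_set _ (fun p : String × String => PatMem max_len p x) x wt PySem.Set.empty ?_]
  · simp only [PySem.Set.empty, List.not_mem_nil, false_or]
  · intro pats p _
    obtain ⟨w1, w2⟩ := p
    simp only [PatMem]
    rw [pg3_mem_foldl_set _ (fun i : Int => ∃ j ∈ PySem.List.pyRange (i + 1) (PySem.Str.len w1 + 1), ∃ k ∈ PySem.List.pyRange 0 (PySem.Str.len w2), ∃ l ∈ PySem.List.pyRange (k + 1) (PySem.Str.len w2 + 1), ¬((j - i) + (l - k) + 3 > max_len) ∧ x = PySem.Str.join "" ["%", PySem.Str.slice w1 (some i) (some j), "%", PySem.Str.slice w2 (some k) (some l), "%"]) x _ pats ?_]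
    · constructor
      · rintro (hx | ⟨i, hi, j, hj, k, hk, l, hl, hc, hs⟩)
        · exact Or.inl hx
        · right
          rw [PySem.List.mem_pyRange_one, PySem.Str.len_eq] at hi hj hk hl
          have hci : ((i.toNat : Nat) : Int) = i := Int.toNat_of_nonneg hi.1
          have hcj : ((j.toNat : Nat) : Int) = j := Int.toNat_of_nonneg (by omega)
          have hck : ((k.toNat : Nat) : Int) = k := Int.toNat_of_nonneg hk.1
          have hcl : ((l.toNat : Nat) : Int) = l := Int.toNat_of_nonneg (by omega)
          refine ⟨i.toNat, j.toNat, k.toNat, l.toNat, by omega, by omega, by omega, by omega, by omega, ?_⟩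
          rw [hci, hcj, hck, hcl]
          exact hs
      · rintro (hx | ⟨a, b, c, d, hab, hb, hcd, hd, hlen, hs⟩)
        · exact Or.inl hx
        · right
          refine ⟨(a : Int), ?_, (b : Int), ?_, (c : Int), ?_, (d : Int), ?_, by omega, hs⟩
          all_goals rw [PySem.List.mem_pyRange_one, PySem.Str.len_eq]
          all_goals push_cast
          all_goals omega
    · intro s1 i _
      rw [pg3_mem_foldl_set _ (fun j : Int => ∃ k ∈ PySem.List.pyRange 0 (PySem.Str.len w2), ∃ l ∈ PySem.List.pyRange (k + 1) (PySem.Str.len w2 + 1), ¬((j - i) + (l - k) + 3 > max_len) ∧ x = PySem.Str.join "" ["%", PySem.Str.slice w1 (some i) (some j), "%", PySem.Str.slice w2 (some k) (some l), "%"]) x _ s1 ?_]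
      intro s2 j _
      rw [pg3_mem_foldl_set _ (fun k : Int => ∃ l ∈ PySem.List.pyRange (k + 1) (PySem.Str.len w2 + 1), ¬((j - i) + (l - k) + 3 > max_len) ∧ x = PySem.Str.join "" ["%", PySem.Str.slice w1 (some i) (some j), "%", PySem.Str.slice w2 (some k) (some l), "%"]) x _ s2 ?_]
      intro s3 k _
      rw [pg3_mem_foldl_set _ (fun l : Int => ¬((j - i) + (l - k) + 3 > max_len) ∧ x = PySem.Str.join "" ["%", PySem.Str.slice w1 (some i) (some j), "%", PySem.Str.slice w2 (some k) (some l), "%"]) x _ s3 ?_]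
      intro s4 l _
      by_cases hc : (j - i) + (l - k) + 3 > max_len
      · rw [if_pos hc]
        simp [hc]
      · rw [if_neg hc]
        rw [PySem.Set.mem_add]
        simp [hc]

theorem pg3_Bpat_iff (w1 w2 : String) (max_len : Int) (x : String) :
    (∃ s1 ∈ pg3B_subsOf w1 (max_len - 4), ∃ s2 ∈ pg3B_subsOf w2 (max_len - 4),
      PySem.Str.len s2 ≤ max_len - 3 - PySem.Str.len s1 ∧
      x = PySem.Str.join "" ["%", s1, "%", s2, "%"]) ↔ PatMem max_len (w1, w2) x := by
  simp only [PatMem]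
  constructor
  · rintro ⟨s1, hs1, s2, hs2, hlen, rfl⟩
    rw [pg3B_subsOf_mem] at hs1 hs2
    obtain ⟨a, b, hab, hb, hbc, rfl⟩ := hs1
    obtain ⟨c, d, hcd, hd, hdc, rfl⟩ := hs2
    rw [pg3_len_slice _ _ _ (by omega) hb, pg3_len_slice _ _ _ (by omega) hd] at hlen
    exact ⟨a, b, c, d, hab, hb, hcd, hd, by omega, rfl⟩
  · rintro ⟨a, b, c, d, hab, hb, hcd, hd, hlen, rfl⟩
    refine ⟨_, (pg3B_subsOf_mem _ _ _).2 ⟨a, b, hab, hb, by omega, rfl⟩,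
            _, (pg3B_subsOf_mem _ _ _).2 ⟨c, d, hcd, hd, by omega, rfl⟩, ?_, rfl⟩
    rw [pg3_len_slice _ _ _ (by omega) hb, pg3_len_slice _ _ _ (by omega) hd]
    omega

theorem pg3B_patterns_mem (pairs : PySem.Set (String × String)) (max_len : Int) (x : String) :
    x ∈ pg3B_patterns pairs (pg3B_subs (pg3B_wordsSet pairs) (max_len - 4)) max_len ↔
      ∃ p ∈ pairs, PatMem max_len p x := by
  simp only [pg3B_patterns]
  rw [pg3_mem_foldl_set _ (fun p : String × String => PatMem max_len p x) x pairs PySem.Set.empty ?_]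
  · simp only [PySem.Set.empty, List.not_mem_nil, false_or]
  · intro pats p hp
    obtain ⟨w1, w2⟩ := p
    have h1 : (pg3B_subs (pg3B_wordsSet pairs) (max_len - 4)).getD w1 PySem.Set.empty
        = pg3B_subsOf w1 (max_len - 4) :=
      pg3B_subs_getD_mem _ _ _ _ ((pg3B_wordsSet_mem pairs w1).2 ⟨(w1, w2), hp, Or.inl rfl⟩)
    have h2 : (pg3B_subs (pg3B_wordsSet pairs) (max_len - 4)).getD w2 PySem.Set.empty
        = pg3B_subsOf w2 (max_len - 4) :=
      pg3B_subs_getD_mem _ _ _ _ ((pg3B_wordsSet_mem pairs w2).2 ⟨(w1, w2), hp, Or.inr rfl⟩)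
    rw [h1, h2]
    rw [pg3_mem_foldl_set _ (fun s1 : String => ∃ s2 ∈ pg3B_subsOf w2 (max_len - 4), PySem.Str.len s2 ≤ max_len - 3 - PySem.Str.len s1 ∧ x = PySem.Str.join "" ["%", s1, "%", s2, "%"]) x _ pats ?_]
    · exact or_congr Iff.rfl (pg3_Bpat_iff w1 w2 max_len x)
    · intro s' s1 _
      rw [pg3_mem_foldl_set _ (fun s2 : String => PySem.Str.len s2 ≤ max_len - 3 - PySem.Str.len s1 ∧ x = PySem.Str.join "" ["%", s1, "%", s2, "%"]) x _ s' ?_]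
      intro s'' s2 _
      by_cases hc : PySem.Str.len s2 ≤ max_len - 3 - PySem.Str.len s1
      · rw [if_pos hc, PySem.Set.mem_add]
        exact or_congr Iff.rfl ⟨fun h => ⟨hc, h⟩, And.right⟩
      · rw [if_neg hc]
        exact ⟨Or.inl, fun h => h.elim id (fun h2 => absurd h2.1 hc)⟩

theorem pg3_patterns_nodup (wt : PySem.Set (String × String)) (max_len : Int) :
    List.Nodup (pg3_patterns wt max_len) := by
  simp only [pg3_patterns]
  apply pg3_nodup_foldl_set _ ?_ _ _ (by simp [PySem.Set.empty])
  intro s p hs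
  apply pg3_nodup_foldl_set _ ?_ _ _ hs
  intro s1 i hs1
  apply pg3_nodup_foldl_set _ ?_ _ _ hs1
  intro s2 j hs2
  apply pg3_nodup_foldl_set _ ?_ _ _ hs2
  intro s3 k hs3
  apply pg3_nodup_foldl_set _ ?_ _ _ hs3
  intro s4 l hs4
  split_ifs
  · exact hs4
  · exact PySem.Set.nodup_add _ _ hs4

theorem pg3B_patterns_nodup (pairs : PySem.Set (String × String)) (subs : PySem.Dict String (PySem.Set String)) (max_len : Int) :
    List.Nodup (pg3B_patterns pairs subs max_len) := by
  simp only [pg3B_patterns]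
  apply pg3_nodup_foldl_set _ ?_ _ _ (by simp [PySem.Set.empty])
  intro s p hs
  apply pg3_nodup_foldl_set _ ?_ _ _ hs
  intro s1 x1 hs1
  apply pg3_nodup_foldl_set _ ?_ _ _ hs1
  intro s2 x2 hs2
  split_ifs
  · exact PySem.Set.nodup_add _ _ hs2
  · exact hs2

-- ===== VERDICT (by name: the statement is the Claim_ definition above) =====
theorem pattern_gen3_spec : Claim_equal_pattern_gen3 := by
  intro sentences pat_type max_len _
  unfold Spec_pattern_gen3 pattern_gen3 pattern_gen3_alt
  apply PySem.List.sorted_eq_sorted_of_perm _ _ _ (fun a b h => h)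
  rw [List.perm_ext_iff_of_nodup (pg3_patterns_nodup _ _) (pg3B_patterns_nodup _ _ _)]
  intro x
  rw [pg3_patterns_mem, pg3B_patterns_mem]
  constructor
  · rintro ⟨p, hp, hpat⟩
    exact ⟨p, (pg3B_pairs_mem _ _).2 ((pg3_tuples_mem _ _).1 hp), hpat⟩
  · rintro ⟨p, hp, hpat⟩
    exact ⟨p, (pg3_tuples_mem _ _).2 ((pg3B_pairs_mem _ _).1 hp), hpat⟩
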